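-- pv_equiv track=rewrite | github.com/lewangdev/bookbookgo_bot | bookbookgo_bot/zlib_searcher.py | sort_books
-- ===== SOURCE A (Python) =====
-- def sort_books(books):
--     extensions = ['epub', 'mobi', 'azw3', 'pdf', 'txt']
--     books_group_by_ext = {}
--     for ext in extensions:
--         books_group_by_ext[ext] = []
--
--     for book in books:
--         book_ext = book['extension']
--         if book_ext not in extensions:
--             continue
--
--         books_group_by_ext[book_ext].append(book)
--
--     books_sorted = []
--     for ext in extensions:
--         books_sorted.extend(books_group_by_ext[ext])
--
--     return books_sorted
-- ===== SOURCE B (Python) =====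
-- def sort_books(books):
--     priority = {'epub': 0, 'mobi': 1, 'azw3': 2, 'pdf': 3, 'txt': 4}
--     filtered = [b for b in books if b['extension'] in priority]
--     return sorted(filtered, key=lambda b: priority[b['extension']])
-- ===== Notes on version B (the rewrite author's own statement) =====
-- stated objective: idiomatic
-- what changed: Replaces the hand-built per-extension bucket dict and concatenation loop with a filter plus one stable sort keyed by a fixed priority index.
import Mathlib
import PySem

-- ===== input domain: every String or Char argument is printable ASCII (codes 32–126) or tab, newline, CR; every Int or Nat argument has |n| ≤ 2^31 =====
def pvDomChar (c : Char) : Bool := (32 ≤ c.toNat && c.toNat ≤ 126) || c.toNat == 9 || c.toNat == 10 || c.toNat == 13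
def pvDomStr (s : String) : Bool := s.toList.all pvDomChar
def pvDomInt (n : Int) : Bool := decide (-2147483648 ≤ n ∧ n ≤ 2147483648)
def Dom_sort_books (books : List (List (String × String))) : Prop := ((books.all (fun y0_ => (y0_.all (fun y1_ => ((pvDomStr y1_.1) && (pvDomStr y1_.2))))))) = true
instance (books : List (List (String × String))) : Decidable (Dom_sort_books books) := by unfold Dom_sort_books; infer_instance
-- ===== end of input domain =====

-- B replaces A's hand-built per-extension bucket dict and concatenation loop with a
-- filter plus one stable sort keyed by a fixed priority index (same cost in practice).

-- book['extension'] (Python raises KeyError when the key is missing; those inputs are outside Pre_)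
def sbKey (book : List (String × String)) : String := (PySem.Dict.mk book).getD "extension" ""

-- ===== PORT A =====
def sort_books (books : List (List (String × String))) : List (List (String × String)) :=
  let extensions : List String := ["epub", "mobi", "azw3", "pdf", "txt"]
  let g0 : PySem.Dict String (List (List (String × String))) :=
    extensions.foldl (fun d ext => d.insert ext []) PySem.Dict.empty
  let g : PySem.Dict String (List (List (String × String))) :=
    books.foldl (fun d book =>
      let book_ext := sbKey book
      if extensions.contains book_ext then d.modify book_ext [] (fun l => l ++ [book]) else d) g0
  extensions.foldl (fun acc ext => acc ++ g.getD ext []) []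

-- ===== PORT B =====
def sbPriority : PySem.Dict String Int :=
  PySem.Dict.mk [("epub", 0), ("mobi", 1), ("azw3", 2), ("pdf", 3), ("txt", 4)]

def sort_books_alt (books : List (List (String × String))) : List (List (String × String)) :=
  let filtered := books.filter (fun b => (sbPriority.get? (sbKey b)).isSome)
  PySem.List.sorted filtered (fun b => sbPriority.getD (sbKey b) 0)

-- ===== PRECONDITION & SPEC =====
-- A (and B) raise KeyError on a book without an 'extension' key; exactly those inputs are excluded.
def Pre_sort_books (books : List (List (String × String))) : Prop :=
  (books.all (fun b => (PySem.Dict.mk b).contains "extension")) = true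
instance (books : List (List (String × String))) : Decidable (Pre_sort_books books) := by unfold Pre_sort_books; infer_instance

def pvWitness_sort_books : (List (List (String × String))) :=
  [[("extension", "pdf"), ("title", "b1")], [("extension", "epub")], [("extension", "doc")]]

def Spec_sort_books (books : List (List (String × String))) (out : List (List (String × String))) : Prop := out = sort_books_alt books
instance (books : List (List (String × String))) (out : List (List (String × String))) : Decidable (Spec_sort_books books out) := by unfold Spec_sort_books; infer_instance

-- ===== CLAIM (what is proved, stated in full; the proofs are below) =====
def Claim_equal_sort_books : Prop := ∀ (books : List (List (String × String))), Dom_sort_books books → Pre_sort_books books → Spec_sort_books books (sort_books books)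

-- ===== LEMMAS AND PROOFS =====

-- abbreviation used only by the proofs
def sbGroup (books : List (List (String × String))) (e : String) : List (List (String × String)) :=
  books.filter (fun b => sbKey b == e)

-- A's grouping loop, characterised bucket by bucket
theorem sbFold_getD (e : String)
    (he : (["epub", "mobi", "azw3", "pdf", "txt"] : List String).contains e = true)
    (books : List (List (String × String))) (d : PySem.Dict String (List (List (String × String)))) :
    (books.foldl (fun d book =>
        if (["epub", "mobi", "azw3", "pdf", "txt"] : List String).contains (sbKey book) then
          d.modify (sbKey book) [] (fun l => l ++ [book]) else d) d).getD e []
      = d.getD e [] ++ sbGroup books e := by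
  induction books generalizing d with
  | nil => simp [sbGroup]
  | cons b rest ih =>
    simp only [List.foldl_cons]
    rw [ih]
    by_cases hbe : sbKey b = e
    · have he' : (["epub", "mobi", "azw3", "pdf", "txt"] : List String).contains (sbKey b) = true := by
        rw [hbe]; exact he
      rw [if_pos he', hbe, PySem.Dict.getD_modify_self]
      simp [sbGroup, hbe, List.append_assoc]
    · have h1 : (sbKey b == e) = false := by simp [hbe]
      by_cases hc : (["epub", "mobi", "azw3", "pdf", "txt"] : List String).contains (sbKey b) = true
      · rw [if_pos hc, PySem.Dict.getD_modify_of_ne _ _ _ (Ne.symm hbe)]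
        simp [sbGroup, h1]
      · simp only [Bool.not_eq_true] at hc
        rw [if_neg (by simp_all)]
        simp [sbGroup, h1]

theorem sort_books_eq_groups (books : List (List (String × String))) :
    sort_books books = sbGroup books "epub" ++ (sbGroup books "mobi" ++ (sbGroup books "azw3"
      ++ (sbGroup books "pdf" ++ sbGroup books "txt"))) := by
  unfold sort_books
  dsimp only
  simp only [List.foldl_cons, List.foldl_nil]
  rw [sbFold_getD "epub" (by decide), sbFold_getD "mobi" (by decide),
      sbFold_getD "azw3" (by decide), sbFold_getD "pdf" (by decide),
      sbFold_getD "txt" (by decide)]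
  simp [PySem.Dict.getD_insert, List.append_assoc]

-- stability helpers for B
theorem insertBy_skip {α : Type} (before : α → α → Bool) (x : α) (g rest : List α)
    (h : ∀ y ∈ g, before x y = false) :
    PySem.List.insertBy before x (g ++ rest) = g ++ PySem.List.insertBy before x rest := by
  induction g with
  | nil => simp
  | cons y g' ih =>
    have hy : before x y = false := h y (by simp)
    simp only [List.cons_append, PySem.List.insertBy, hy]
    simp [ih (fun z hz => h z (by simp [hz]))]

theorem insertBy_front {α : Type} (before : α → α → Bool) (x : α) (l : List α)
    (h : ∀ y ∈ l, before x y = true) :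
    PySem.List.insertBy before x l = x :: l := by
  cases l with
  | nil => rfl
  | cons y l' => simp [PySem.List.insertBy, h y (by simp)]

theorem ins_flatMap {α : Type} (key : α → Int) (x : α) (p : List α) :
    ∀ (vs : List Int), vs.Pairwise (· < ·) → key x ∈ vs →
    PySem.List.insertBy (fun a b => decide (key a < key b)) x
        (vs.flatMap (fun v => p.filter (fun y => key y == v)))
      = vs.flatMap (fun v => p.filter (fun y => key y == v) ++ if key x == v then [x] else []) := by
  intro vs
  induction vs with
  | nil => intro _ hx; simp at hx
  | cons v vs' ih =>
    intro hvs hx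
    have hv : ∀ w ∈ vs', v < w := fun w hw => (List.pairwise_cons.mp hvs).1 w hw
    have hvs' := (List.pairwise_cons.mp hvs).2
    simp only [List.flatMap_cons]
    by_cases hxv : key x = v
    · have hskip : ∀ y ∈ p.filter (fun y => key y == v), decide (key x < key y) = false := by
        intro y hy
        have : key y = v := by simpa using (List.mem_filter.mp hy).2
        simp [hxv, this]
      rw [insertBy_skip _ _ _ _ hskip]
      have hfront : ∀ z ∈ vs'.flatMap (fun v => p.filter (fun y => key y == v)),
          decide (key x < key z) = true := by
        intro z hz
        obtain ⟨w, hw, hzw⟩ := List.mem_flatMap.mp hz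
        have : key z = w := by simpa using (List.mem_filter.mp hzw).2
        simp [hxv, this]
        exact hv w hw
      rw [insertBy_front _ _ _ hfront]
      have htail : vs'.flatMap (fun v => p.filter (fun y => key y == v) ++ if key x == v then [x] else [])
          = vs'.flatMap (fun v => p.filter (fun y => key y == v)) := by
        apply List.flatMap_congr
        intro w hw
        have : (key x == w) = false := by
          have := hv w hw; simp [hxv]; omega
        simp [this]
      rw [htail]
      simp [hxv]
    · have hx' : key x ∈ vs' := by
        rcases List.mem_cons.mp hx with h | h
        · exact absurd h hxv
        · exact h
      have hvlt : v < key x := hv _ hx'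
      have hskip : ∀ y ∈ p.filter (fun y => key y == v), decide (key x < key y) = false := by
        intro y hy
        have : key y = v := by simpa using (List.mem_filter.mp hy).2
        simp [this]; omega
      rw [insertBy_skip _ _ _ _ hskip, ih hvs' hx']
      have : (key x == v) = false := by simp [hxv]
      simp [this]

theorem sorted_groups {α : Type} (key : α → Int) (p : List α) (vs : List Int)
    (hvs : vs.Pairwise (· < ·)) (hall : ∀ x ∈ p, key x ∈ vs) :
    PySem.List.sorted p key = vs.flatMap (fun v => p.filter (fun x => key x == v)) := by
  induction p using List.reverseRecOn with
  | nil => simp [PySem.List.sorted_eq_foldl_insertBy]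
  | append_singleton p x ih =>
    rw [PySem.List.sorted_eq_foldl_insertBy, List.foldl_append]
    simp only [List.foldl_cons, List.foldl_nil]
    rw [← PySem.List.sorted_eq_foldl_insertBy,
        ih (fun y hy => hall y (by simp [hy])),
        ins_flatMap key x p vs hvs (hall x (by simp))]
    apply List.flatMap_congr
    intro v hv
    by_cases h : key x = v <;> simp [List.filter_append, h]

theorem sbCase (s : String) :
    s = "epub" ∨ s = "mobi" ∨ s = "azw3" ∨ s = "pdf" ∨ s = "txt" ∨ sbPriority.get? s = none := by
  by_cases h1 : s = "epub"; · exact Or.inl h1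
  by_cases h2 : s = "mobi"; · exact Or.inr (Or.inl h2)
  by_cases h3 : s = "azw3"; · exact Or.inr (Or.inr (Or.inl h3))
  by_cases h4 : s = "pdf"; · exact Or.inr (Or.inr (Or.inr (Or.inl h4)))
  by_cases h5 : s = "txt"; · exact Or.inr (Or.inr (Or.inr (Or.inr (Or.inl h5))))
  refine Or.inr (Or.inr (Or.inr (Or.inr (Or.inr ?_))))
  simp [sbPriority, Ne.symm h1, Ne.symm h2, Ne.symm h3, Ne.symm h4, Ne.symm h5, PySem.Dict.get?]

theorem sbKeyMem (b : List (String × String))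
    (hb : (sbPriority.get? (sbKey b)).isSome = true) :
    sbPriority.getD (sbKey b) 0 ∈ ([0, 1, 2, 3, 4] : List Int) := by
  rcases sbCase (sbKey b) with h | h | h | h | h | h
  · rw [h]; decide
  · rw [h]; decide
  · rw [h]; decide
  · rw [h]; decide
  · rw [h]; decide
  · rw [h] at hb; simp at hb

theorem sbFact0 (s : String) :
    ((sbPriority.get? s).isSome && (sbPriority.getD s 0 == (0 : Int))) = (s == "epub") := by
  rcases sbCase s with rfl | rfl | rfl | rfl | rfl | hn
  · decide
  · decide
  · decide
  · decide
  · decide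
  · by_cases hse : s = "epub"
    · subst hse; simp [sbPriority, PySem.Dict.get?] at hn
    · simp [hn, hse]

theorem sbFact1 (s : String) :
    ((sbPriority.get? s).isSome && (sbPriority.getD s 0 == (1 : Int))) = (s == "mobi") := by
  rcases sbCase s with rfl | rfl | rfl | rfl | rfl | hn
  · decide
  · decide
  · decide
  · decide
  · decide
  · by_cases hse : s = "mobi"
    · subst hse; simp [sbPriority, PySem.Dict.get?] at hn
    · simp [hn, hse]

theorem sbFact2 (s : String) :
    ((sbPriority.get? s).isSome && (sbPriority.getD s 0 == (2 : Int))) = (s == "azw3") := by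
  rcases sbCase s with rfl | rfl | rfl | rfl | rfl | hn
  · decide
  · decide
  · decide
  · decide
  · decide
  · by_cases hse : s = "azw3"
    · subst hse; simp [sbPriority, PySem.Dict.get?] at hn
    · simp [hn, hse]

theorem sbFact3 (s : String) :
    ((sbPriority.get? s).isSome && (sbPriority.getD s 0 == (3 : Int))) = (s == "pdf") := by
  rcases sbCase s with rfl | rfl | rfl | rfl | rfl | hn
  · decide
  · decide
  · decide
  · decide
  · decide
  · by_cases hse : s = "pdf"
    · subst hse; simp [sbPriority, PySem.Dict.get?] at hn
    · simp [hn, hse]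

theorem sbFact4 (s : String) :
    ((sbPriority.get? s).isSome && (sbPriority.getD s 0 == (4 : Int))) = (s == "txt") := by
  rcases sbCase s with rfl | rfl | rfl | rfl | rfl | hn
  · decide
  · decide
  · decide
  · decide
  · decide
  · by_cases hse : s = "txt"
    · subst hse; simp [sbPriority, PySem.Dict.get?] at hn
    · simp [hn, hse]

theorem sbFF (books : List (List (String × String))) (i : Int) (e : String)
    (h : ∀ s, ((sbPriority.get? s).isSome && (sbPriority.getD s 0 == i)) = (s == e)) :
    (books.filter (fun b => (sbPriority.get? (sbKey b)).isSome)).filter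
      (fun b => sbPriority.getD (sbKey b) 0 == i) = sbGroup books e := by
  rw [List.filter_filter]
  unfold sbGroup
  apply List.filter_congr
  intro b _
  rw [Bool.and_comm]; exact h (sbKey b)

theorem sort_books_alt_eq_groups (books : List (List (String × String))) :
    sort_books_alt books = sbGroup books "epub" ++ (sbGroup books "mobi" ++ (sbGroup books "azw3"
      ++ (sbGroup books "pdf" ++ sbGroup books "txt"))) := by
  unfold sort_books_alt
  dsimp only
  rw [sorted_groups _ _ ([0, 1, 2, 3, 4] : List Int) (by decide)
      (fun x hx => sbKeyMem x (by simpa using (List.mem_filter.mp hx).2))]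
  simp only [List.flatMap_cons, List.flatMap_nil, List.append_nil]
  rw [sbFF books 0 "epub" sbFact0, sbFF books 1 "mobi" sbFact1, sbFF books 2 "azw3" sbFact2,
      sbFF books 3 "pdf" sbFact3, sbFF books 4 "txt" sbFact4]

-- ===== VERDICT (by name: the statement is the Claim_ definition above) =====
theorem sort_books_spec : Claim_equal_sort_books := by
  intro books _ _
  unfold Spec_sort_books
  rw [sort_books_eq_groups, sort_books_alt_eq_groups]
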